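-- pv_equiv track=rewrite | github.com/MrBrantCode/unitest_baseline | mut_generate/mist_train_cf/cf_38760/solution.py | parse_language_classifiers
-- ===== SOURCE A (Python) =====
-- from typing import List, Dict
--
-- def parse_language_classifiers(classifiers: List[str]) -> Dict[str, Dict[str, int]]:
--     language_versions = {}
--     for classifier in classifiers:
--         parts = classifier.split(' :: ')
--         language = parts[1]
--         version = parts[2] if len(parts) > 2 else None
--         if language not in language_versions:
--             language_versions[language] = {}
--         if version not in language_versions[language]:
--             language_versions[language][version] = 1
--         else:
--             language_versions[language][version] += 1
--     return language_versions
-- ===== SOURCE B (Python) =====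
-- from collections import Counter
--
--
-- def parse_language_classifiers(classifiers):
--     keys = []
--     for classifier in classifiers:
--         parts = classifier.split(' :: ')
--         keys.append((parts[1], parts[2] if len(parts) > 2 else None))
--     counts = Counter(keys)
--     return {lang: {ver: n for (lang2, ver), n in counts.items() if lang2 == lang}
--             for lang in dict.fromkeys(lang for lang, _ in keys)}
-- ===== Notes on version B (the rewrite author's own statement) =====
-- stated objective: alternative
-- what changed: A builds the nested language->version->count dict incrementally inside the loop; B first maps each classifier to a flat (language, version) key list, counts them with one collections.Counter, and then reshapes the flat counter into the nested dict in a second pass.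
import Mathlib
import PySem

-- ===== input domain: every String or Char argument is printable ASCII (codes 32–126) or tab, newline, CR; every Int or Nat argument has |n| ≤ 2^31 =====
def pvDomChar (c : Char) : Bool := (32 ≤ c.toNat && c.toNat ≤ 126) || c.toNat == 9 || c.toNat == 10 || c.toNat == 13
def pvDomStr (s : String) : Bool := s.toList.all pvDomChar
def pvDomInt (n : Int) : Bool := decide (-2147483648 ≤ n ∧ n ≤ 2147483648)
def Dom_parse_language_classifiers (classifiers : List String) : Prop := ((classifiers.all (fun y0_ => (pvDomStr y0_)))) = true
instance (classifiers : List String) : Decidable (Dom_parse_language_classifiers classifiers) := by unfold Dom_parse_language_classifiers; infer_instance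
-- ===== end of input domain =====

-- B replaces A's in-loop nested-dict construction by a flat Counter over (language, version)
-- keys plus a reshape into the nested dict (objective: alternative decomposition, same cost).


-- ===== PORT A =====
def parse_language_classifiers (classifiers : List String) : List (String × List (Option String × Int)) :=
  let language_versions : PySem.Dict String (PySem.Dict (Option String) Int) :=
    classifiers.foldl (fun language_versions classifier =>
      let parts := (PySem.Str.split? classifier " :: ").getD []
      let language := PySem.List.pyGetD parts 1 ""
      let version : Option String := if 2 < parts.length then some (PySem.List.pyGetD parts 2 "") else none
      let language_versions :=
        if language_versions.contains language then language_versions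
        else language_versions.insert language PySem.Dict.empty
      let inner := language_versions.getD language PySem.Dict.empty
      let inner :=
        if inner.contains version then inner.insert version (inner.getD version 0 + 1)
        else inner.insert version 1
      language_versions.insert language inner) PySem.Dict.empty
  language_versions.items.map (fun p => (p.1, p.2.items))

-- ===== PORT B =====
def parse_language_classifiers_alt (classifiers : List String) : List (String × List (Option String × Int)) :=
  let keys : List (String × Option String) := classifiers.foldl (fun keys classifier =>
      let parts := (PySem.Str.split? classifier " :: ").getD []
      keys ++ [(PySem.List.pyGetD parts 1 "",
                if 2 < parts.length then some (PySem.List.pyGetD parts 2 "") else none)]) []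
  let counts := PySem.Dict.counter keys
  (PySem.List.dedup (keys.map Prod.fst)).map (fun lang =>
    (lang, counts.items.filterMap (fun p => if p.1.1 == lang then some (p.1.2, p.2) else none)))

-- ===== PRECONDITION & SPEC =====
-- Pre_ excludes exactly the classifiers without ' :: ' (fewer than two split parts), on which
-- Python A raises IndexError at parts[1].
def Pre_parse_language_classifiers (classifiers : List String) : Prop :=
  ∀ c ∈ classifiers, 2 ≤ ((PySem.Str.split? c " :: ").getD []).length
instance (classifiers : List String) : Decidable (Pre_parse_language_classifiers classifiers) := by unfold Pre_parse_language_classifiers; infer_instance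
def pvWitness_parse_language_classifiers : List String :=
  ["Programming Language :: Python :: 3", "Programming Language :: Python"]
def Spec_parse_language_classifiers (classifiers : List String) (out : List (String × List (Option String × Int))) : Prop := out = parse_language_classifiers_alt classifiers
instance (classifiers : List String) (out : List (String × List (Option String × Int))) : Decidable (Spec_parse_language_classifiers classifiers out) := by unfold Spec_parse_language_classifiers; infer_instance

-- ===== CLAIM (what is proved, stated in full; the proofs are below) =====
def Claim_equal_parse_language_classifiers : Prop := ∀ (classifiers : List String), Dom_parse_language_classifiers classifiers → Pre_parse_language_classifiers classifiers → Spec_parse_language_classifiers classifiers (parse_language_classifiers classifiers)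

-- ===== LEMMAS AND PROOFS =====

-- the (language, version) key one classifier contributes
def pvKey (c : String) : String × Option String :=
  let parts := (PySem.Str.split? c " :: ").getD []
  (PySem.List.pyGetD parts 1 "", if 2 < parts.length then some (PySem.List.pyGetD parts 2 "") else none)

-- A's loop body, as a function of the key only
def pvStepA (d : PySem.Dict String (PySem.Dict (Option String) Int)) (k : String × Option String) :
    PySem.Dict String (PySem.Dict (Option String) Int) :=
  let d1 := if d.contains k.1 then d else d.insert k.1 PySem.Dict.empty
  let inner := d1.getD k.1 PySem.Dict.empty
  let inner' :=
    if inner.contains k.2 then inner.insert k.2 (inner.getD k.2 0 + 1)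
    else inner.insert k.2 1
  d1.insert k.1 inner'

-- versions seen for language l, in first-occurrence order
def pvVs (ks : List (String × Option String)) (l : String) : List (Option String) :=
  (PySem.Set.ofList ks).filterMap (fun k => if k.1 == l then some k.2 else none)

-- the inner dict A holds for language l after processing ks
def pvInner (ks : List (String × Option String)) (l : String) : List (Option String × Int) :=
  (pvVs ks l).map (fun v => (v, (ks.count (l, v) : Int)))

-- the canonical value of A's nested dict after processing ks
def pvD (ks : List (String × Option String)) : PySem.Dict String (PySem.Dict (Option String) Int) :=
  PySem.Dict.mk ((PySem.Set.ofList (ks.map Prod.fst)).map (fun l => (l, PySem.Dict.mk (pvInner ks l))))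

theorem pv_find_beq_of_mem {α : Type} [BEq α] [LawfulBEq α] (xs : List α) (l : α) (h : l ∈ xs) :
    xs.find? (fun x => x == l) = some l := by
  induction xs with
  | nil => cases h
  | cons x xs ih =>
    rcases List.mem_cons.mp h with rfl | hm
    · simp [List.find?]
    · by_cases hx : x = l
      · simp [List.find?, hx]
      · have hb : (x == l) = false := by simpa using hx
        simp [List.find?, hb, ih hm]

-- contains / get? of the outer canonical dict
theorem pv_contains_outer (ks : List (String × Option String)) (l : String) :
    (pvD ks).contains l = true ↔ l ∈ ks.map Prod.fst := by
  simp [pvD, PySem.Dict.contains, List.any_map, Function.comp_def, List.any_eq_true,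
    PySem.Set.mem_ofList]

theorem pv_get_outer (ks : List (String × Option String)) (l : String) (h : l ∈ ks.map Prod.fst) :
    (pvD ks).get? l = some (PySem.Dict.mk (pvInner ks l)) := by
  have hmem : l ∈ PySem.Set.ofList (ks.map Prod.fst) := (PySem.Set.mem_ofList _ _).mpr h
  simp [pvD, PySem.Dict.get?, List.find?_map, Function.comp_def,
    pv_find_beq_of_mem _ _ hmem]

theorem pv_mem_vs (ks : List (String × Option String)) (l : String) (v : Option String) :
    v ∈ pvVs ks l ↔ (l, v) ∈ ks := by
  simp only [pvVs, List.mem_filterMap]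
  constructor
  · rintro ⟨⟨k1, k2⟩, hk, he⟩
    by_cases h1 : k1 = l
    · subst h1; simp at he; subst he; exact (PySem.Set.mem_ofList _ _).mp hk
    · simp [h1] at he
  · intro h
    exact ⟨(l, v), (PySem.Set.mem_ofList _ _).mpr h, by simp⟩

theorem pv_contains_inner (ks : List (String × Option String)) (l : String) (v : Option String) :
    (PySem.Dict.mk (pvInner ks l)).contains v = true ↔ (l, v) ∈ ks := by
  simp [pvInner, PySem.Dict.contains, List.any_map, Function.comp_def, List.any_eq_true,
    pv_mem_vs]

theorem pv_get_inner (ks : List (String × Option String)) (l : String) (v : Option String)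
    (h : (l, v) ∈ ks) :
    (PySem.Dict.mk (pvInner ks l)).get? v = some ((ks.count (l, v) : Int)) := by
  have hmem : v ∈ pvVs ks l := (pv_mem_vs ks l v).mpr h
  simp [pvInner, PySem.Dict.get?, List.find?_map, Function.comp_def,
    pv_find_beq_of_mem _ _ hmem]

theorem pv_ofList_append {α : Type} [BEq α] (xs : List α) (x : α) :
    PySem.Set.ofList (xs ++ [x]) = (PySem.Set.ofList xs).add x := by
  simp [PySem.Set.ofList, List.foldl_append]

theorem pv_add_mem {α : Type} [BEq α] [LawfulBEq α] (s : PySem.Set α) (x : α) (h : x ∈ s) :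
    s.add x = s := by
  simp [PySem.Set.add, h]

theorem pv_add_not_mem {α : Type} [BEq α] [LawfulBEq α] (s : PySem.Set α) (x : α) (h : ¬ x ∈ s) :
    s.add x = s ++ [x] := by
  simp [PySem.Set.add, h]

-- versions of another language are untouched by one more (l, v) key
theorem pv_vs_snoc_ne (ks : List (String × Option String)) (l l' : String) (v : Option String)
    (h : l' ≠ l) : pvVs (ks ++ [(l, v)]) l' = pvVs ks l' := by
  unfold pvVs
  rw [pv_ofList_append]
  by_cases hk : (l, v) ∈ PySem.Set.ofList ks
  · rw [pv_add_mem _ _ hk]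
  · rw [pv_add_not_mem _ _ hk]
    simp [List.filterMap_append, h.symm]

theorem pv_inner_snoc_ne (ks : List (String × Option String)) (l l' : String) (v : Option String)
    (h : l' ≠ l) : pvInner (ks ++ [(l, v)]) l' = pvInner ks l' := by
  unfold pvInner
  rw [pv_vs_snoc_ne ks l l' v h]
  apply List.map_congr_left
  intro v' hv'
  have : ((l', v') : String × Option String) ≠ (l, v) := by
    intro he; exact h (congrArg Prod.fst he)
  have h2 : List.count ((l', v') : String × Option String) [(l, v)] = 0 :=
    List.count_eq_zero.mpr (by simp [this])
  rw [List.count_append, h2]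
  simp

theorem pv_vs_snoc_mem (ks : List (String × Option String)) (l : String) (v : Option String)
    (h : (l, v) ∈ ks) : pvVs (ks ++ [(l, v)]) l = pvVs ks l := by
  unfold pvVs
  rw [pv_ofList_append, pv_add_mem _ _ ((PySem.Set.mem_ofList _ _).mpr h)]

theorem pv_vs_snoc_new (ks : List (String × Option String)) (l : String) (v : Option String)
    (h : ¬ (l, v) ∈ ks) : pvVs (ks ++ [(l, v)]) l = pvVs ks l ++ [v] := by
  unfold pvVs
  rw [pv_ofList_append, pv_add_not_mem _ _ (fun hm => h ((PySem.Set.mem_ofList _ _).mp hm))]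
  simp [List.filterMap_append]

theorem pv_inner_snoc_mem (ks : List (String × Option String)) (l : String) (v : Option String)
    (h : (l, v) ∈ ks) :
    pvInner (ks ++ [(l, v)]) l
      = (pvInner ks l).map (fun p => if p.1 == v then (v, (ks.count (l, v) : Int) + 1) else p) := by
  unfold pvInner
  rw [pv_vs_snoc_mem ks l v h, List.map_map]
  apply List.map_congr_left
  intro v' _
  by_cases hv : v' = v
  · subst hv
    simp [List.count_append]
  · have hne : ((l, v') : String × Option String) ≠ (l, v) := by
      intro he; exact hv (congrArg Prod.snd he)
    have h2 : List.count ((l, v') : String × Option String) [(l, v)] = 0 :=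
      List.count_eq_zero.mpr (by simp [hne])
    rw [List.count_append, h2]
    simp [hv]

theorem pv_inner_snoc_new (ks : List (String × Option String)) (l : String) (v : Option String)
    (h : ¬ (l, v) ∈ ks) :
    pvInner (ks ++ [(l, v)]) l = pvInner ks l ++ [(v, 1)] := by
  unfold pvInner
  rw [pv_vs_snoc_new ks l v h]
  rw [List.map_append]
  congr 1
  · apply List.map_congr_left
    intro v' hv'
    have hne : ((l, v') : String × Option String) ≠ (l, v) := by
      intro he
      exact h (he ▸ (pv_mem_vs ks l v').mp hv')
    have h2 : List.count ((l, v') : String × Option String) [(l, v)] = 0 :=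
      List.count_eq_zero.mpr (by simp [hne])
    rw [List.count_append, h2]
    simp
  · have : ks.count (l, v) = 0 := List.count_eq_zero.mpr h
    simp [List.count_append, this]

-- items of an in-place overwrite of the canonical outer dict
theorem pv_insert_outer (ks : List (String × Option String)) (l : String)
    (h : l ∈ ks.map Prod.fst) (X : PySem.Dict (Option String) Int) :
    ((pvD ks).insert l X).items
      = (PySem.Set.ofList (ks.map Prod.fst)).map
          (fun l' => if l' = l then (l, X) else (l', PySem.Dict.mk (pvInner ks l'))) := by
  rw [PySem.Dict.insert, if_pos ((pv_contains_outer ks l).mpr h)]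
  show ((pvD ks).items.map _) = _
  rw [show (pvD ks).items = (PySem.Set.ofList (ks.map Prod.fst)).map
        (fun l' => (l', PySem.Dict.mk (pvInner ks l'))) from rfl, List.map_map]
  apply List.map_congr_left
  intro l' _
  by_cases hl : l' = l
  · simp [hl]
  · simp [hl]

theorem pv_step (ks : List (String × Option String)) (k : String × Option String) :
    pvStepA (pvD ks) k = pvD (ks ++ [k]) := by
  obtain ⟨l, v⟩ := k
  by_cases hl : l ∈ ks.map Prod.fst
  · -- language already present
    unfold pvStepA
    simp only
    rw [if_pos ((pv_contains_outer ks l).mpr hl)]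
    rw [PySem.Dict.getD, pv_get_outer ks l hl, Option.getD_some]
    have hls : PySem.Set.ofList ((ks ++ [(l, v)]).map Prod.fst)
        = PySem.Set.ofList (ks.map Prod.fst) := by
      simp only [List.map_append, List.map_cons, List.map_nil]
      rw [pv_ofList_append, pv_add_mem _ _ ((PySem.Set.mem_ofList _ _).mpr hl)]
    by_cases hk : (l, v) ∈ ks
    · -- (l, v) already counted: in-place increment
      have hins : (PySem.Dict.mk (pvInner ks l)).insert v ((ks.count (l, v) : Int) + 1)
          = PySem.Dict.mk ((pvInner ks l).map
              (fun p => if p.1 == v then (v, (ks.count (l, v) : Int) + 1) else p)) := by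
        rw [PySem.Dict.insert, if_pos ((pv_contains_inner ks l v).mpr hk)]
      rw [if_pos ((pv_contains_inner ks l v).mpr hk), PySem.Dict.getD,
        pv_get_inner ks l v hk, Option.getD_some, hins]
      apply PySem.Dict.ext
      rw [pv_insert_outer ks l hl]
      show _ = (PySem.Set.ofList ((ks ++ [(l, v)]).map Prod.fst)).map _
      rw [hls]
      apply List.map_congr_left
      intro l' _
      by_cases hll : l' = l
      · subst hll
        rw [if_pos rfl, pv_inner_snoc_mem ks l' v hk]
      · rw [if_neg hll, pv_inner_snoc_ne ks l l' v hll]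
    · -- language present, new version: append to the inner dict
      have hnc : ¬ (PySem.Dict.mk (pvInner ks l)).contains v = true := by
        intro hc
        exact hk ((pv_contains_inner ks l v).mp hc)
      have hins : (PySem.Dict.mk (pvInner ks l)).insert v 1
          = PySem.Dict.mk (pvInner ks l ++ [(v, 1)]) := by
        rw [PySem.Dict.insert, if_neg hnc]
      rw [if_neg hnc, hins]
      apply PySem.Dict.ext
      rw [pv_insert_outer ks l hl]
      show _ = (PySem.Set.ofList ((ks ++ [(l, v)]).map Prod.fst)).map _
      rw [hls]
      apply List.map_congr_left
      intro l' _
      by_cases hll : l' = l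
      · subst hll
        rw [if_pos rfl, pv_inner_snoc_new ks l' v hk]
      · rw [if_neg hll, pv_inner_snoc_ne ks l l' v hll]
  · -- new language: appended at the end
    have hk : ¬ (l, v) ∈ ks := fun hm => hl (List.mem_map_of_mem hm)
    have hnotin : ∀ l', l' ∈ PySem.Set.ofList (ks.map Prod.fst) → l' ≠ l := by
      intro l' hm he
      exact hl (he ▸ (PySem.Set.mem_ofList _ _).mp hm)
    unfold pvStepA
    simp only
    rw [if_neg (fun hc => hl ((pv_contains_outer ks l).mp hc))]
    rw [PySem.Dict.getD, PySem.Dict.get?_insert_self, Option.getD_some]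
    rw [show (PySem.Dict.empty : PySem.Dict (Option String) Int).contains v = false from rfl]
    simp only [Bool.false_eq_true, if_false]
    have hempty : (PySem.Dict.empty : PySem.Dict (Option String) Int).insert v 1
        = PySem.Dict.mk [(v, 1)] := rfl
    have hd1 : (pvD ks).insert l PySem.Dict.empty
        = PySem.Dict.mk ((pvD ks).items ++ [(l, PySem.Dict.empty)]) := by
      rw [PySem.Dict.insert, if_neg (fun hc => hl ((pv_contains_outer ks l).mp hc))]
    have hc1 : ((pvD ks).insert l PySem.Dict.empty).contains l = true := by
      rw [hd1]
      simp [PySem.Dict.contains]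
    rw [hempty, PySem.Dict.insert, if_pos hc1]
    apply PySem.Dict.ext
    show ((pvD ks).insert l PySem.Dict.empty).items.map _ = _
    rw [hd1]
    show ((pvD ks).items ++ [(l, PySem.Dict.empty)]).map _ = _
    rw [List.map_append]
    have hlast : [((l : String), (PySem.Dict.empty : PySem.Dict (Option String) Int))].map
        (fun p => if (p.1 == l) = true then (l, PySem.Dict.mk [(v, 1)]) else p)
        = [(l, PySem.Dict.mk [(v, 1)])] := by
      simp
    rw [hlast]
    have hmain : (pvD ks).items.map
        (fun p => if (p.1 == l) = true then (l, PySem.Dict.mk [(v, 1)]) else p)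
        = (PySem.Set.ofList (ks.map Prod.fst)).map
            (fun l' => (l', PySem.Dict.mk (pvInner (ks ++ [(l, v)]) l'))) := by
      show ((PySem.Set.ofList (ks.map Prod.fst)).map
          (fun l' => (l', PySem.Dict.mk (pvInner ks l')))).map _ = _
      rw [List.map_map]
      apply List.map_congr_left
      intro l' hm
      have hne : l' ≠ l := hnotin l' hm
      have hb : (l' == l) = false := by simpa using hne
      simp only [Function.comp_def, hb, Bool.false_eq_true, if_false]
      rw [pv_inner_snoc_ne ks l l' v hne]
    rw [hmain]
    -- right-hand side
    have hvs0 : pvVs ks l = [] := by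
      rw [pvVs, List.filterMap_eq_nil_iff]
      intro k' hk'
      have : k'.1 ≠ l := by
        intro he
        exact hl (he ▸ List.mem_map_of_mem ((PySem.Set.mem_ofList _ _).mp hk'))
      simp [this]
    have hinner0 : pvInner (ks ++ [(l, v)]) l = [(v, 1)] := by
      rw [pv_inner_snoc_new ks l v hk, pvInner, hvs0]
      rfl
    show _ = (PySem.Set.ofList ((ks ++ [(l, v)]).map Prod.fst)).map _
    simp only [List.map_append, List.map_cons, List.map_nil]
    rw [pv_ofList_append,
      pv_add_not_mem _ _ (fun hm => hl ((PySem.Set.mem_ofList _ _).mp hm)), List.map_append]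
    congr 1
    simp [hinner0]

theorem pv_fold (ks : List (String × Option String)) :
    ks.foldl pvStepA PySem.Dict.empty = pvD ks := by
  induction ks using List.reverseRecOn with
  | nil => rfl
  | append_singleton ks k ih => rw [List.foldl_append, List.foldl_cons, List.foldl_nil, ih, pv_step]

theorem pv_inner_eq (S : List (String × Option String)) (l : String)
    (c : String × Option String → Int) :
    S.filterMap (fun k => if k.1 == l then some (k.2, c k) else none)
      = (S.filterMap (fun k => if k.1 == l then some k.2 else none)).map (fun v => (v, c (l, v))) := by
  induction S with
  | nil => rfl
  | cons x S ih =>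
    obtain ⟨x1, x2⟩ := x
    simp only [List.filterMap_cons]
    by_cases hx : x1 = l
    · subst hx
      rw [if_pos (by simp), if_pos (by simp)]
      simp only [List.map_cons]
      rw [ih]
    · rw [if_neg (by simp [hx]), if_neg (by simp [hx])]
      exact ih

theorem pv_A_eq (classifiers : List String) :
    parse_language_classifiers classifiers
      = ((pvD (classifiers.map pvKey)).items).map (fun p => (p.1, p.2.items)) := by
  rw [← pv_fold, List.foldl_map]
  rfl

theorem pv_B_core (ks : List (String × Option String)) :
    (PySem.List.dedup (ks.map Prod.fst)).map (fun lang =>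
      (lang, (PySem.Dict.counter ks).items.filterMap
        (fun p => if p.1.1 == lang then some (p.1.2, p.2) else none)))
      = ((pvD ks).items).map (fun p => (p.1, p.2.items)) := by
  unfold pvD
  simp only [List.map_map, PySem.Dict.items_counter, List.filterMap_map, PySem.List.dedup]
  apply List.map_congr_left
  intro l _
  simp only [Function.comp_def, pvInner, pvVs]
  rw [pv_inner_eq]

theorem pv_B_eq (classifiers : List String) :
    parse_language_classifiers_alt classifiers
      = ((pvD (classifiers.map pvKey)).items).map (fun p => (p.1, p.2.items)) := by
  unfold parse_language_classifiers_alt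
  rw [show (fun (keys : List (String × Option String)) (classifier : String) =>
        keys ++ [((PySem.List.pyGetD ((PySem.Str.split? classifier " :: ").getD []) 1 ""),
          if 2 < ((PySem.Str.split? classifier " :: ").getD []).length then
            some (PySem.List.pyGetD ((PySem.Str.split? classifier " :: ").getD []) 2 "")
          else none)])
      = (fun keys classifier => keys ++ [pvKey classifier]) from rfl,
    PySem.List.foldl_append_singleton_eq_map, List.nil_append]
  exact pv_B_core (classifiers.map pvKey)

-- ===== VERDICT (by name: the statement is the Claim_ definition above) =====
theorem parse_language_classifiers_spec : Claim_equal_parse_language_classifiers := by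
  intro classifiers _ _
  unfold Spec_parse_language_classifiers
  rw [pv_A_eq, pv_B_eq]
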